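-- pv_equiv track=rewrite | github.com/iivansaanchez/Programming-Python- | programaciónModularIII/ejercicios/ejercicio4.py | numberInString
-- ===== SOURCE A (Python) =====
-- def numberInString(characterString):
--     contador=0
--     numberString = "0123456789"
--     for a in range(len(characterString)):
--         for i in range(len(numberString)):
--             if characterString[a] == numberString[i]:
--                 contador+=1
--     return contador
-- ===== SOURCE B (Python) =====
-- def numberInString(characterString):
--     return sum(characterString.count(d) for d in "0123456789")
-- ===== Notes on version B (the rewrite author's own statement) =====
-- stated objective: faster
-- what changed: Replaces the nested per-character-times-per-digit Python-level comparison loop by one C-level str.count scan per digit character, summing the ten counts.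
import Mathlib
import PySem

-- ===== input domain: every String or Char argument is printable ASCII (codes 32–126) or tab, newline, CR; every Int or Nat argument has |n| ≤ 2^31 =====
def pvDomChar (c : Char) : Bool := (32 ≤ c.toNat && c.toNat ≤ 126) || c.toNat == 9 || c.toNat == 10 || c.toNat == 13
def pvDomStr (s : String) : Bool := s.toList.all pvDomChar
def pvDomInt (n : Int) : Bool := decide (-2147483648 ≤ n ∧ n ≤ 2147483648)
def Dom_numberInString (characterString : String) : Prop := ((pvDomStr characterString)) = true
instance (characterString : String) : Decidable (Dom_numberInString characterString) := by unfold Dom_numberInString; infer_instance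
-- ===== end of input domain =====

-- B replaces A's nested per-character × per-digit comparison loop by one str.count pass per digit character, summing the ten counts (measured faster by a constant factor: C-level str.count vs Python-level loops).

-- ===== PORT A =====
def numberInString (characterString : String) : Int :=
  (PySem.List.pyRange 0 (PySem.Str.len characterString) 1).foldl
    (fun contador a =>
      (PySem.List.pyRange 0 (PySem.Str.len "0123456789") 1).foldl
        (fun contador i =>
          if PySem.Str.pyGet? characterString a == PySem.Str.pyGet? "0123456789" i
          then contador + 1 else contador)
        contador)
    0

-- ===== PORT B =====
def numberInString_alt (characterString : String) : Int :=
  ("0123456789".toList.map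
    (fun d => (PySem.Str.count characterString (String.singleton d) : Int))).sum

-- ===== PRECONDITION & SPEC =====
def Spec_numberInString (characterString : String) (out : Int) : Prop := out = numberInString_alt characterString
instance (characterString : String) (out : Int) : Decidable (Spec_numberInString characterString out) := by unfold Spec_numberInString; infer_instance

-- ===== CLAIM (what is proved, stated in full; the proofs are below) =====
def Claim_equal_numberInString : Prop := ∀ (characterString : String), Dom_numberInString characterString → Spec_numberInString characterString (numberInString characterString)

-- ===== LEMMAS AND PROOFS =====

-- an index loop 'for i in range(len(xs)): … xs[i] …' visits exactly the elements of xs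
theorem foldl_range_get {α : Type} (xs : List α) (f : Int → Option α → Int) (init : Int) :
    (PySem.List.pyRange 0 (xs.length : Int) 1).foldl (fun acc i => f acc (PySem.List.pyGet? xs i)) init
      = xs.foldl (fun acc c => f acc (some c)) init := by
  induction xs using List.reverseRecOn generalizing init with
  | nil => simp [PySem.List.pyRange_one_eq_nil]
  | append_singleton ys y ih =>
    have hlen : ((ys ++ [y]).length : Int) = (ys.length : Int) + 1 := by simp
    rw [hlen, PySem.List.pyRange_one_succ_right (by positivity), List.foldl_append, List.foldl_append]
    rw [PySem.List.foldl_congr_mem _ _ (fun acc i => f acc (PySem.List.pyGet? ys i)) init ?_]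
    · rw [ih]
      simp
    · intro acc x hx
      rw [PySem.List.mem_pyRange_one] at hx
      congr 1
      rw [PySem.List.pyGet?_of_nonneg _ hx.1, PySem.List.pyGet?_of_nonneg _ hx.1,
        List.getElem?_append_left (by omega)]

-- Python's s.count(d) for a single character d is the plain character count
theorem count_go_single (d : Char) (l : List Char) : ∀ (fuel acc : Nat), l.length ≤ fuel →
    PySem.Chars.count.go [d] fuel l acc = acc + l.count d := by
  induction l with
  | nil => intro fuel acc h; cases fuel <;> simp [PySem.Chars.count.go]
  | cons x t ih =>
    intro fuel acc h
    cases fuel with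
    | zero => simp at h
    | succ f =>
      rw [PySem.Chars.count.go]
      by_cases hx : d = x
      · subst hx
        simp [List.isPrefixOf, ih f (acc + 1) (by simpa using h)]
        omega
      · simp [List.isPrefixOf, Ne.symm hx, hx, ih f acc (by simpa using h)]

theorem count_single (s : List Char) (d : Char) : PySem.Chars.count s [d] = s.count d := by
  simp [PySem.Chars.count]
  rw [count_go_single d s s.length 0 le_rfl]
  omega

-- double-counting: summing, over the chars of xs, their count in ys equals summing, over ys, counts in xs
theorem sum_count_comm (xs ys : List Char) :
    (xs.map (fun c => (ys.count c : Int))).sum = (ys.map (fun d => (xs.count d : Int))).sum := by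
  induction xs with
  | nil => simp
  | cons x t ih =>
    simp only [List.map_cons, List.sum_cons, ih]
    have hmap : ys.map (fun d => ((x :: t).count d : Int))
        = ys.map (fun d => (t.count d : Int) + if d == x then 1 else 0) := by
      apply List.map_congr_left
      intro d _
      rw [List.count_cons]
      push_cast
      split_ifs <;> simp_all
    rw [hmap, PySem.List.sum_map_add_int, PySem.List.sum_map_ite_one_zero]
    have : List.countP (fun d => d == x) ys = ys.count x := rfl
    rw [this]
    ring

-- A computes, per character of the string, its count among the ten digit characters
theorem portA_eq (s : String) :
    numberInString s
      = s.toList.foldl (fun acc c => acc + ("0123456789".toList.count c : Int)) 0 := by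
  unfold numberInString
  simp only [PySem.Str.len_eq, PySem.Str.pyGet?_eq, PySem.Chars.pyGet?]
  refine Eq.trans (foldl_range_get s.toList
    (fun acc o =>
      (PySem.List.pyRange 0 ("0123456789".toList.length : Int) 1).foldl
        (fun c i => if o == PySem.List.pyGet? "0123456789".toList i then c + 1 else c) acc) 0) ?_
  apply PySem.List.foldl_congr_mem
  intro acc c _
  refine Eq.trans (foldl_range_get "0123456789".toList
    (fun a o => if some c == o then a + 1 else a) acc) ?_
  simp only [Option.some_beq_some]
  refine Eq.trans (PySem.List.foldl_if_add_one (fun d => c == d) "0123456789".toList acc) ?_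
  congr 2
  exact List.countP_congr (fun x _ => by simp [BEq.comm])

theorem portB_eq (s : String) :
    numberInString_alt s
      = ("0123456789".toList.map (fun d => (s.toList.count d : Int))).sum := by
  unfold numberInString_alt
  apply congrArg
  apply List.map_congr_left
  intro d _
  rw [PySem.Str.count_eq]
  simp [count_single]

-- ===== VERDICT (by name: the statement is the Claim_ definition above) =====
theorem numberInString_spec : Claim_equal_numberInString := by
  intro s _
  unfold Spec_numberInString
  rw [portA_eq, portB_eq, ← sum_count_comm]
  rw [PySem.List.foldl_add s.toList (fun c => ("0123456789".toList.count c : Int)) 0]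
  simp
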